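-- pv_equiv track=rewrite | github.com/zhenya-klpv/astroclassify | astroclassify/api/main.py | _pixels_bin_from_shape
-- ===== SOURCE A (Python) =====
-- from typing import Any, Dict, Iterable, List, Optional, Sequence, Tuple
--
-- _PIXEL_BIN_BOUNDARIES = (
--     (0, 524_288, "lt_0_5mp"),          # up to ~0.5 MP
--     (524_288, 2_097_152, "0_5_2mp"),   # 0.5-2 MP
--     (2_097_152, 8_388_608, "2_8mp"),   # 2-8 MP
--     (8_388_608, 20_971_520, "8_20mp"), # 8-20 MP
--     (20_971_520, float("inf"), "gt_20mp"),
-- )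
--
-- def _pixels_bin_from_shape(shape: Optional[Sequence[int]]) -> str:
--     if not shape or len(shape) < 2:
--         return "unknown"
--     height = int(shape[-2])
--     width = int(shape[-1])
--     if height <= 0 or width <= 0:
--         return "unknown"
--     pixels = height * width
--     for lower, upper, label in _PIXEL_BIN_BOUNDARIES:
--         if pixels <= upper:
--             return label
--     return _PIXEL_BIN_BOUNDARIES[-1][2]
-- ===== SOURCE B (Python) =====
-- import bisect
-- from typing import Optional, Sequence
--
-- _THRESHOLDS = [524_288, 2_097_152, 8_388_608, 20_971_520]
-- _LABELS = ["lt_0_5mp", "0_5_2mp", "2_8mp", "8_20mp", "gt_20mp"]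
--
-- def _pixels_bin_from_shape(shape: Optional[Sequence[int]]) -> str:
--     if not shape or len(shape) < 2:
--         return "unknown"
--     height = int(shape[-2])
--     width = int(shape[-1])
--     if height <= 0 or width <= 0:
--         return "unknown"
--     pixels = height * width
--     return _LABELS[bisect.bisect_left(_THRESHOLDS, pixels)]
-- ===== Notes on version B (the rewrite author's own statement) =====
-- stated objective: idiomatic
-- what changed: Replaces the early-returning linear scan over (lower, upper, label) triples by an index lookup: bisect_left on a sorted threshold list selects the bin label from a parallel label table.
import Mathlib
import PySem

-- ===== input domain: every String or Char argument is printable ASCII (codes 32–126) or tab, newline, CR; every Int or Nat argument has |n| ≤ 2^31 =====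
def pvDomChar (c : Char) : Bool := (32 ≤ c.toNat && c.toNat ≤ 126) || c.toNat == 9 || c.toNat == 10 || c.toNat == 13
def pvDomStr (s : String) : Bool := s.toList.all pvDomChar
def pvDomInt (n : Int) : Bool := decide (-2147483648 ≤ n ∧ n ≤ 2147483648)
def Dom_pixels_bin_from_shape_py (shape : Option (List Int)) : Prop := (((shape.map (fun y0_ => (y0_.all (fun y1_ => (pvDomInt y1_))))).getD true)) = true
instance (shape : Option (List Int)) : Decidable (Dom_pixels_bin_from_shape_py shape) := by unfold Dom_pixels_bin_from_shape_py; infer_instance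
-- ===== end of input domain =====

-- B replaces A's early-returning linear scan over (lower, upper, label) triples
-- by a bisect_left index into a sorted threshold list paired with a label table (idiomatic).
-- ===== PORT A =====
-- upper bound 'none' transliterates Python's float("inf") (pixels <= inf is always true)
def pvBoundaries : List (Int × Option Int × String) :=
  [(0, some 524288, "lt_0_5mp"), (524288, some 2097152, "0_5_2mp"),
   (2097152, some 8388608, "2_8mp"), (8388608, some 20971520, "8_20mp"),
   (20971520, none, "gt_20mp")]

-- the 'for lower, upper, label in _PIXEL_BIN_BOUNDARIES: if pixels <= upper: return label' loop;
-- the [] fallback is Python's trailing 'return _PIXEL_BIN_BOUNDARIES[-1][2]'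
def pvScanA (pixels : Int) : List (Int × Option Int × String) → String
  | [] => "gt_20mp"
  | (_, upper, label) :: rest =>
    if (match upper with | none => true | some u => pixels ≤ u) then label else pvScanA pixels rest

def pixels_bin_from_shape_py (shape : Option (List Int)) : String :=
  match shape with
  | none => "unknown"
  | some s =>
    if s.isEmpty ∨ s.length < 2 then "unknown"
    else
      -- len(s) ≥ 2, so shape[-2], shape[-1] never raise; the getD 0 branch is unreachable
      let height := (PySem.List.pyGet? s (-2)).getD 0
      let width := (PySem.List.pyGet? s (-1)).getD 0
      if height ≤ 0 ∨ width ≤ 0 then "unknown"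
      else pvScanA (height * width) pvBoundaries

-- ===== PORT B =====
def pvThresholds : List Int := [524288, 2097152, 8388608, 20971520]
def pvLabels : List String := ["lt_0_5mp", "0_5_2mp", "2_8mp", "8_20mp", "gt_20mp"]

-- bisect.bisect_left on a sorted list = number of elements strictly below x
def pvBisectLeft (xs : List Int) (x : Int) : Nat := xs.countP (fun t => t < x)

def pixels_bin_from_shape_py_alt (shape : Option (List Int)) : String :=
  match shape with
  | none => "unknown"
  | some s =>
    if s.isEmpty ∨ s.length < 2 then "unknown"
    else
      let height := (PySem.List.pyGet? s (-2)).getD 0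
      let width := (PySem.List.pyGet? s (-1)).getD 0
      if height ≤ 0 ∨ width ≤ 0 then "unknown"
      else pvLabels.getD (pvBisectLeft pvThresholds (height * width)) ""

-- ===== PRECONDITION & SPEC =====
def Spec_pixels_bin_from_shape_py (shape : Option (List Int)) (out : String) : Prop := out = pixels_bin_from_shape_py_alt shape
instance (shape : Option (List Int)) (out : String) : Decidable (Spec_pixels_bin_from_shape_py shape out) := by unfold Spec_pixels_bin_from_shape_py; infer_instance

-- ===== CLAIM (what is proved, stated in full; the proofs are below) =====
def Claim_equal_pixels_bin_from_shape_py : Prop := ∀ (shape : Option (List Int)), Dom_pixels_bin_from_shape_py shape → Spec_pixels_bin_from_shape_py shape (pixels_bin_from_shape_py shape)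

-- ===== LEMMAS AND PROOFS =====
theorem pvScan_eq_lookup (p : Int) :
    pvScanA p pvBoundaries = pvLabels.getD (pvBisectLeft pvThresholds p) "" := by
  by_cases h1 : p ≤ 524288 <;> by_cases h2 : p ≤ 2097152 <;>
    by_cases h3 : p ≤ 8388608 <;> by_cases h4 : p ≤ 20971520 <;>
    simp only [pvScanA, pvBoundaries, pvBisectLeft, pvThresholds, pvLabels,
      List.countP_cons, List.countP_nil, decide_eq_true_eq] <;>
    split_ifs <;> simp_all <;> omega

-- ===== VERDICT (by name: the statement is the Claim_ definition above) =====
theorem pixels_bin_from_shape_py_spec : Claim_equal_pixels_bin_from_shape_py := by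
  intro shape _
  unfold Spec_pixels_bin_from_shape_py pixels_bin_from_shape_py pixels_bin_from_shape_py_alt
  match shape with
  | none => rfl
  | some s =>
    simp only []
    split
    · rfl
    · split
      · rfl
      · exact pvScan_eq_lookup _
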